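-- pv_equiv track=rewrite | github.com/rknightion/meraki-dashboard-ha | custom_components/meraki_dashboard/utils.py | sanitize_device_name
-- ===== SOURCE A (Python) =====
-- def sanitize_device_name(name: str | None) -> str | None:
--     """Sanitize device name for display purposes.
--
--     This function cleans device names for display while preserving
--     capitalization and readability.
--
--     Args:
--         name: Original device name
--
--     Returns:
--         Sanitized name suitable for display, or None if input was None
--     """
--     if name is None:
--         return None
--
--     if not name.strip():
--         return ""
--
--     # Remove control characters and null bytes
--     sanitized = "".join(char for char in name if ord(char) >= 32 or char in "\n\t")
--
--     # Replace multiple spaces with single space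
--     sanitized = " ".join(sanitized.split())
--
--     # Clean up special characters but preserve parentheses for display
--     sanitized = (
--         sanitized.replace("@", " ").replace("#", " ").replace("$", " ").replace("%", "")
--     )
--
--     # Clean up multiple spaces again
--     sanitized = " ".join(sanitized.split())
--
--     return sanitized.strip()
-- ===== SOURCE B (Python) =====
-- def sanitize_device_name(name):
--     """Single-pass re-implementation: classify each character once and build words."""
--     if name is None:
--         return None
--     words = []
--     cur = []
--     for ch in name:
--         if ch in " \t\n@#$":
--             if cur:
--                 words.append("".join(cur))
--                 cur = []
--         elif ch == "%" or ord(ch) < 32: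
--             pass
--         else:
--             cur.append(ch)
--     if cur:
--         words.append("".join(cur))
--     return " ".join(words)
-- ===== Notes on version B (the rewrite author's own statement) =====
-- stated objective: simpler
-- what changed: Replaced A's five-stage pipeline (character filter, split/join, four sequential replace passes, second split/join, strip) by one single pass over the characters that classifies each char as separator/dropped/kept, accumulates words, and joins them once.
import Mathlib
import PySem

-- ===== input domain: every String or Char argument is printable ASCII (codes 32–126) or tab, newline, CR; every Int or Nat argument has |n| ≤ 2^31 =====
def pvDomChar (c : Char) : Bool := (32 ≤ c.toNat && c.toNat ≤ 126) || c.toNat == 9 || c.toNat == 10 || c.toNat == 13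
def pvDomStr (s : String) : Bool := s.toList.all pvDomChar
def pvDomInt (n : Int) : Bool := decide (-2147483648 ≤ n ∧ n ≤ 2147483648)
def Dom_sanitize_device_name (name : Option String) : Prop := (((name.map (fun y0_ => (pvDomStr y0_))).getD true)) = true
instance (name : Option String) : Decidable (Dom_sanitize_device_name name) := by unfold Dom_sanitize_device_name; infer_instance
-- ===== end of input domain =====

-- B replaces A's five-stage pipeline by one single pass that classifies each character
-- and accumulates words; equal return values on the whole ASCII domain (objective: simpler).

-- ===== PORT A =====
-- literal transliteration of A: None guard, whitespace-only guard, control-char filter,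
-- split/join, four replaces, split/join, strip
def sanitize_device_name (name : Option String) : Option String :=
  match name with
  | none => none
  | some s =>
    if (PySem.Chars.strip s.toList).isEmpty then some "" else
    let s1 := s.toList.filter (fun c => decide (32 ≤ c.toNat) || c == '\n' || c == '\t')
    let s2 := PySem.Chars.join [' '] (PySem.Chars.split₀ s1)
    let s3 := PySem.Chars.replace (PySem.Chars.replace (PySem.Chars.replace
                (PySem.Chars.replace s2 ['@'] [' ']) ['#'] [' ']) ['$'] [' ']) ['%'] []
    let s4 := PySem.Chars.join [' '] (PySem.Chars.split₀ s3)
    some (String.ofList (PySem.Chars.strip s4))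

-- ===== PORT B =====
def pvSepB (c : Char) : Bool := c == ' ' || c == '\t' || c == '\n' || c == '@' || c == '#' || c == '$'
def pvDropB (c : Char) : Bool := c == '%' || decide (c.toNat < 32)
-- the single pass of Source B: state = (words so far, current word)
def pvGoWords : List Char → List (List Char) → List Char → List (List Char)
  | [], ws, cur => if cur.isEmpty then ws else ws ++ [cur]
  | c :: rest, ws, cur =>
    if pvSepB c then (if cur.isEmpty then pvGoWords rest ws [] else pvGoWords rest (ws ++ [cur]) [])
    else if pvDropB c then pvGoWords rest ws cur
    else pvGoWords rest ws (cur ++ [c])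

def sanitize_device_name_alt (name : Option String) : Option String :=
  match name with
  | none => none
  | some s => some (String.ofList (PySem.Chars.join [' '] (pvGoWords s.toList [] [])))

-- ===== PRECONDITION & SPEC =====
def Spec_sanitize_device_name (name : Option String) (out : Option String) : Prop := out = sanitize_device_name_alt name
instance (name : Option String) (out : Option String) : Decidable (Spec_sanitize_device_name name out) := by unfold Spec_sanitize_device_name; infer_instance

-- ===== CLAIM (what is proved, stated in full; the proofs are below) =====
def Claim_equal_sanitize_device_name : Prop := ∀ (name : Option String), Dom_sanitize_device_name name → Spec_sanitize_device_name name (sanitize_device_name name)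

-- ===== LEMMAS AND PROOFS =====

def pvNE (w : List Char) : Bool := !w.isEmpty

def pvSb (c : Char) : Bool := PySem.Chars.isspace c || c == '@' || c == '#' || c == '$'

def pvRb (c : Char) : Bool := !(c == '%')

def pvG (w : List Char) : List Char := w.filter pvRb

def pvSub (c : Char) : List Char :=
  if c == '@' || c == '#' || c == '$' then [' '] else if c == '%' then [] else [c]

def pvWords (cs : List Char) : List (List Char) :=
  ((List.splitOnP pvSb (cs.filter (fun c => !(c == '\r')))).map pvG).filter pvNE

theorem pvNE_true {w : List Char} (h : w ≠ []) : pvNE w = true := by simp [pvNE, h]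

theorem pvNE_false : pvNE ([] : List Char) = false := by simp [pvNE]

theorem pvNE_nil : ¬ (pvNE ([] : List Char) = true) := by simp [pvNE]

theorem pvNE_cons (c : Char) (w : List Char) : pvNE (c :: w) = true := by simp [pvNE]

theorem pv_modifyHead_id (l : List (List Char)) : l.modifyHead (fun x => x) = l := by cases l <;> rfl

theorem pv_modifyHead_nil (l : List (List Char)) : l.modifyHead (fun x => [] ++ x) = l := by cases l <;> rfl

theorem pv_char_eq_iff (c d : Char) : (c == d) = decide (c.toNat = d.toNat) := by
  have h2 : c = d ↔ c.toNat = d.toNat := by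
    constructor
    · intro h; rw [h]
    · intro h; exact Char.ext (by exact UInt32.toNat_inj.mp h)
  rw [Bool.eq_iff_iff]; simp only [beq_iff_eq, decide_eq_true_eq]; exact h2

theorem pv_char_eq_toNat (c d : Char) : c = d ↔ c.toNat = d.toNat := by
  constructor
  · intro h; rw [h]
  · intro h; exact Char.ext (by exact UInt32.toNat_inj.mp h)

theorem pv_isspace_dom (c : Char) (h : pvDomChar c = true) :
    PySem.Chars.isspace c = (decide (c.toNat = 32) || decide (c.toNat = 9) || decide (c.toNat = 10) || decide (c.toNat = 13)) := by
  simp only [pvDomChar] at h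
  simp only [PySem.Chars.isspace]
  rw [Bool.eq_iff_iff]
  simp only [Bool.or_eq_true, Bool.and_eq_true, decide_eq_true_eq, beq_iff_eq] at h ⊢
  omega

theorem pv_classify (c : Char) (h : pvDomChar c = true) :
    (pvSepB c = true ∧ pvSb c = true ∧ (c == '\r') = false)
  ∨ (pvSepB c = false ∧ pvDropB c = true ∧ c = '\r')
  ∨ (pvSepB c = false ∧ pvDropB c = true ∧ c = '%' ∧ pvSb c = false ∧ (c == '\r') = false)
  ∨ (pvSepB c = false ∧ pvDropB c = false ∧ pvSb c = false ∧ pvRb c = true ∧ (c == '\r') = false) := by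
  have hd := h
  simp only [pvDomChar] at hd
  simp only [pvSepB, pvDropB, pvSb, pvRb, pv_isspace_dom c h, pv_char_eq_iff, pv_char_eq_toNat]
  simp only [Bool.or_eq_true, Bool.or_eq_false_iff, Bool.and_eq_true, decide_eq_true_eq,
    decide_eq_false_iff_not, Bool.not_eq_true', Bool.not_eq_false', beq_iff_eq,
    Bool.not_eq_eq_eq_not, Bool.not_true, Bool.not_false] at hd ⊢
  simp only [show (' ' : Char).toNat = 32 from rfl, show ('\t' : Char).toNat = 9 from rfl,
    show ('\n' : Char).toNat = 10 from rfl, show ('\r' : Char).toNat = 13 from rfl,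
    show ('@' : Char).toNat = 64 from rfl, show ('#' : Char).toNat = 35 from rfl,
    show ('$' : Char).toNat = 36 from rfl, show ('%' : Char).toNat = 37 from rfl] at hd ⊢
  omega

theorem pv_keep1 (c : Char) (h : pvDomChar c = true) :
    (decide (32 ≤ c.toNat) || c == '\n' || c == '\t') = !(c == '\r') := by
  simp only [pvDomChar] at h
  rw [Bool.eq_iff_iff]
  simp only [Bool.or_eq_true, Bool.and_eq_true, decide_eq_true_eq, beq_iff_eq,
    Bool.not_eq_eq_eq_not, Bool.not_true, Bool.not_false, pv_char_eq_iff, Nat.beq_eq] at h ⊢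
  simp only [show ('\t' : Char).toNat = 9 from rfl, show ('\n' : Char).toNat = 10 from rfl,
    show ('\r' : Char).toNat = 13 from rfl, decide_eq_true_eq, decide_eq_false_iff_not] at h ⊢
  omega

theorem pv_split₀_go (xs : List Char) (cur : List Char) (acc : List (List Char)) :
    PySem.Chars.split₀.go xs cur acc
      = acc.reverse ++ ((List.splitOnP PySem.Chars.isspace xs).modifyHead (cur.reverse ++ ·)).filter pvNE := by
  induction xs generalizing cur acc with
  | nil =>
    simp only [PySem.Chars.split₀.go, List.splitOnP_nil, List.modifyHead, List.append_nil]
    by_cases h : cur.isEmpty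
    · have hc' : cur = [] := by simpa [List.isEmpty_iff] using h
      rw [if_pos h, hc']
      simp [List.filter_cons, pvNE_false]
    · have hc' : cur.reverse ≠ [] := by simp [List.isEmpty_iff] at h; simpa using h
      rw [if_neg h]
      simp [List.filter_cons, pvNE_true hc']
  | cons c rest ih =>
    obtain ⟨h', t', hsp⟩ := List.exists_cons_of_ne_nil (List.splitOnP_ne_nil PySem.Chars.isspace rest)
    simp only [PySem.Chars.split₀.go, List.splitOnP_cons]
    by_cases hs : PySem.Chars.isspace c
    · rw [if_pos hs, if_pos hs]
      by_cases hc : cur.isEmpty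
      · have hc' : cur = [] := by simpa [List.isEmpty_iff] using hc
        rw [if_pos hc, ih, hc']
        simp only [List.reverse_nil, List.nil_append, List.modifyHead_cons, pv_modifyHead_id]
        simp [List.filter_cons, pvNE_false, pv_modifyHead_id]
      · have hc' : cur.reverse ≠ [] := by simp [List.isEmpty_iff] at hc; simpa using hc
        rw [if_neg hc, ih]
        simp only [List.modifyHead_cons, pv_modifyHead_id, List.reverse_cons, List.reverse_nil]
        simp [List.filter_cons, pvNE_false, pvNE_true hc', pv_modifyHead_id]
    · rw [if_neg hs, if_neg hs, ih, List.modifyHead_modifyHead]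
      have hf : ((fun x => cur.reverse ++ x) ∘ List.cons c) = (fun x => (c :: cur).reverse ++ x) := by
        funext w; simp
      rw [hf]

theorem pv_split₀_eq (xs : List Char) :
    PySem.Chars.split₀ xs = (List.splitOnP PySem.Chars.isspace xs).filter pvNE := by
  rw [PySem.Chars.split₀, pv_split₀_go]
  simp [pv_modifyHead_id]

theorem pv_replace_go (a : Char) (new : List Char) (l acc : List Char) (fuel : Nat)
    (h : l.length ≤ fuel) :
    PySem.Chars.replace.go [a] new fuel l acc
      = acc.reverse ++ l.flatMap (fun c => if c == a then new else [c]) := by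
  induction l generalizing fuel acc with
  | nil => cases fuel <;> simp [PySem.Chars.replace.go]
  | cons c t ih =>
    cases fuel with
    | zero => simp at h
    | succ f =>
      simp only [PySem.Chars.replace.go]
      by_cases hc : c = a
      · have hp : [a].isPrefixOf (c :: t) = true := by simp [List.isPrefixOf, hc]
        rw [if_pos hp]
        simp only [List.length_cons] at h
        rw [show List.drop [a].length (c :: t) = t by simp]
        rw [ih _ _ (by omega)]
        simp [hc]
      · have hp : ¬ ([a].isPrefixOf (c :: t) = true) := by simp [List.isPrefixOf]; exact fun h => hc h.symm
        rw [if_neg hp]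
        simp only [List.length_cons] at h
        rw [ih _ _ (by omega)]
        simp [hc]

theorem pv_replace_single (xs new : List Char) (a : Char) :
    PySem.Chars.replace xs [a] new = xs.flatMap (fun c => if c == a then new else [c]) := by
  rw [PySem.Chars.replace]
  rw [if_neg (by simp)]
  exact pv_replace_go a new xs [] xs.length (le_refl _)

theorem pv_replaces_eq (xs : List Char) :
    PySem.Chars.replace (PySem.Chars.replace (PySem.Chars.replace
      (PySem.Chars.replace xs ['@'] [' ']) ['#'] [' ']) ['$'] [' ']) ['%'] []
      = xs.flatMap pvSub := by
  rw [pv_replace_single, pv_replace_single, pv_replace_single, pv_replace_single]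
  rw [List.flatMap_assoc, List.flatMap_assoc, List.flatMap_assoc]
  congr 1
  funext c
  by_cases h1 : c = '@'
  · simp [pvSub, h1]
  · by_cases h2 : c = '#'
    · simp [pvSub, h1, h2]
    · by_cases h3 : c = '$'
      · simp [pvSub, h1, h2, h3]
      · by_cases h4 : c = '%'
        · simp [pvSub, h1, h2, h3, h4]
        · simp [pvSub, h1, h2, h3, h4]

theorem pv_sub_split (xs : List Char) (h : ∀ c ∈ xs, PySem.Chars.isspace c = true → c = ' ') :
    List.splitOnP PySem.Chars.isspace (xs.flatMap pvSub) = (List.splitOnP pvSb xs).map pvG := by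
  induction xs with
  | nil => simp [pvG]
  | cons c rest ih =>
    have hrest : ∀ c ∈ rest, PySem.Chars.isspace c = true → c = ' ' := fun c hc => h c (.tail _ hc)
    obtain ⟨h', t', hsp⟩ := List.exists_cons_of_ne_nil (List.splitOnP_ne_nil pvSb rest)
    have ihx := ih hrest
    simp only [List.flatMap_cons, List.splitOnP_cons]
    by_cases h1 : c = '@' ∨ c = '#' ∨ c = '$'
    · have hsub : pvSub c = [' '] := by
        rcases h1 with h1 | h1 | h1 <;> simp [pvSub, h1]
      have hsb : pvSb c = true := by
        rcases h1 with h1 | h1 | h1 <;> simp [pvSb, h1]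
      rw [hsub, hsb]
      simp only [List.singleton_append, List.splitOnP_cons,
        show PySem.Chars.isspace ' ' = true from rfl, if_pos rfl, if_pos rfl]
      simp [ihx, pvG]
    · push_neg at h1
      obtain ⟨n1, n2, n3⟩ := h1
      by_cases hsp2 : PySem.Chars.isspace c
      · have hce : c = ' ' := h c (.head _) hsp2
        have hsub : pvSub c = [' '] := by rw [hce]; rfl
        have hsb : pvSb c = true := by simp [pvSb, hsp2]
        rw [hsub, hsb]
        simp only [List.singleton_append, List.splitOnP_cons,
          show PySem.Chars.isspace ' ' = true from rfl, if_pos rfl]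
        simp [ihx, pvG]
      · by_cases h4 : c = '%'
        · have hsub : pvSub c = [] := by simp [pvSub, h4, n1, n2, n3]
          have hsb : pvSb c = false := by simp [pvSb, hsp2, n1, n2, n3]
          rw [hsub, hsb]
          simp only [List.nil_append, if_neg (by simp [hsp2] : ¬ (PySem.Chars.isspace c = true)),
            Bool.false_eq_true, if_false, hsp, ihx, List.map_cons]
          rw [hsp] at ihx
          simp only [ihx, List.map_cons, List.modifyHead_cons]
          congr 1
          simp [pvG, pvRb, h4]
        · have hsub : pvSub c = [c] := by simp [pvSub, h4, n1, n2, n3]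
          have hsb : pvSb c = false := by simp [pvSb, hsp2, n1, n2, n3]
          rw [hsub, hsb]
          simp only [List.singleton_append, List.splitOnP_cons, if_neg (by simp [hsp2] : ¬ (PySem.Chars.isspace c = true))]
          rw [hsp] at ihx
          simp only [Bool.false_eq_true, if_false, ihx, List.map_cons, List.modifyHead_cons, hsp]
          congr 1
          simp [pvG, pvRb, h4]

theorem pv_splitOnP_head (p : Char → Bool) (xs : List Char) :
    ∃ t, List.splitOnP p xs = xs.takeWhile (fun c => !p c) :: t := by
  induction xs with
  | nil => exact ⟨[], rfl⟩
  | cons c rest ih =>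
    obtain ⟨t, ht⟩ := ih
    by_cases hp : p c
    · exact ⟨List.splitOnP p rest, by simp [List.splitOnP_cons, hp, List.takeWhile_cons]⟩
    · exact ⟨t, by simp [List.splitOnP_cons, hp, List.takeWhile_cons, ht]⟩

theorem pv_sp_imp_sb (c : Char) (h : PySem.Chars.isspace c = true) : pvSb c = true := by
  simp [pvSb, h]

theorem pv_nested_split (xs : List Char) :
    ((List.splitOnP PySem.Chars.isspace xs).flatMap (List.splitOnP pvSb)).filter pvNE
      = (List.splitOnP pvSb xs).filter pvNE := by
  induction xs with
  | nil => simp [pvNE]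
  | cons c rest ih =>
    obtain ⟨h, t, hsp⟩ := List.exists_cons_of_ne_nil (List.splitOnP_ne_nil PySem.Chars.isspace rest)
    obtain ⟨H, T, hsb⟩ := List.exists_cons_of_ne_nil (List.splitOnP_ne_nil pvSb rest)
    by_cases h1 : PySem.Chars.isspace c
    · have h2 : pvSb c = true := pv_sp_imp_sb c h1
      simp only [List.splitOnP_cons, h1, h2, if_true]
      simp only [List.flatMap_cons, List.filter_append, List.filter_cons_of_neg pvNE_nil]
      rw [← List.filter_append]
      exact ih
    · by_cases h2 : pvSb c
      · simp only [List.splitOnP_cons, if_neg h1, h2, if_true, hsp,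
          List.modifyHead_cons, List.flatMap_cons, List.splitOnP_cons, if_pos h2,
          List.filter_cons_of_neg pvNE_nil, List.filter_append]
        rw [hsp] at ih
        simp only [List.flatMap_cons, List.filter_append] at ih
        exact ih
      · obtain ⟨t2, ht2⟩ := pv_splitOnP_head pvSb h
        have hhh : h = rest.takeWhile (fun d => !PySem.Chars.isspace d) := by
          obtain ⟨t3, ht3⟩ := pv_splitOnP_head PySem.Chars.isspace rest
          rw [hsp] at ht3; exact (List.cons_eq_cons.mp ht3).1
        have hHH : H = rest.takeWhile (fun d => !pvSb d) := by
          obtain ⟨t4, ht4⟩ := pv_splitOnP_head pvSb rest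
          rw [hsb] at ht4; exact (List.cons_eq_cons.mp ht4).1
        have hheads : h.takeWhile (fun d => !pvSb d) = H := by
          rw [hhh, hHH, List.takeWhile_takeWhile]
          congr 1
          funext d
          by_cases hd : pvSb d
          · simp [hd]
          · have hspd : PySem.Chars.isspace d = false := by
              cases hx : PySem.Chars.isspace d
              · rfl
              · exact absurd (pv_sp_imp_sb d hx) (by simp [hd])
            simp [hd, hspd]
        simp only [List.splitOnP_cons, if_neg h1, if_neg h2, hsp, hsb,
          List.modifyHead_cons, List.flatMap_cons, List.filter_append]
        rw [ht2, List.modifyHead_cons]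
        rw [List.filter_cons_of_pos (pvNE_cons _ _), List.filter_cons_of_pos (pvNE_cons _ _)]
        rw [hsp, hsb] at ih
        simp only [List.flatMap_cons, List.filter_append] at ih
        rw [ht2] at ih
        rcases List.eq_nil_or_concat' H with hH | ⟨H0, a, hH⟩
        · subst hH
          have htkw : h.takeWhile (fun d => !pvSb d) = [] := hheads
          rw [htkw] at ih ⊢
          simp only [List.filter_cons_of_neg pvNE_nil] at ih ⊢
          simp [ih, hheads]
        · have hne : H ≠ [] := by subst hH; simp
          have htkne : h.takeWhile (fun d => !pvSb d) ≠ [] := by rw [hheads]; exact hne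
          rw [List.filter_cons_of_pos (pvNE_true htkne), List.filter_cons_of_pos (pvNE_true hne)] at ih
          obtain ⟨hh1, hh2⟩ := List.cons_eq_cons.mp ih
          simp only [hheads]
          exact congrArg (List.cons (c :: H)) hh2

theorem pv_join_cons (w w2 : List Char) (ws : List (List Char)) :
    PySem.Chars.join [' '] (w :: w2 :: ws) = w ++ ' ' :: PySem.Chars.join [' '] (w2 :: ws) := by
  simp [PySem.Chars.join, List.intercalate, List.intersperse_cons₂]

theorem pv_join_single (w : List Char) : PySem.Chars.join [' '] [w] = w := by
  simp [PySem.Chars.join, List.intercalate]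

theorem pv_join_nil : PySem.Chars.join [' '] [] = [] := by
  simp [PySem.Chars.join, List.intercalate]

theorem pv_split_join (ws : List (List Char)) :
    (List.splitOnP pvSb (PySem.Chars.join [' '] ws)).filter pvNE
      = (ws.flatMap (List.splitOnP pvSb)).filter pvNE := by
  induction ws with
  | nil => simp [pv_join_nil, pvNE]
  | cons w ws ih =>
    cases ws with
    | nil => simp [pv_join_single]
    | cons w2 ws2 =>
      rw [pv_join_cons, List.splitOnP_append_cons pvSb _ _ ' ' (by rfl)]
      simp only [List.flatMap_cons, List.filter_append] at ih ⊢
      rw [ih]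

theorem pv_unfilter (L : List (List Char)) :
    (((L.filter pvNE).flatMap (List.splitOnP pvSb))).filter pvNE
      = ((L.flatMap (List.splitOnP pvSb))).filter pvNE := by
  induction L with
  | nil => simp
  | cons w L ih =>
    by_cases hw : w = []
    · subst hw
      rw [List.filter_cons_of_neg pvNE_nil]
      simp only [List.flatMap_cons, List.filter_append, ih]
      simp [List.splitOnP_nil, List.filter_cons_of_neg pvNE_nil]
    · rw [List.filter_cons_of_pos (by simp [pvNE, hw])]
      simp only [List.flatMap_cons, List.filter_append, ih]

theorem pv_E (L : List (List Char)) :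
    ((L.map pvG).filter pvNE) = (((L.filter pvNE).map pvG).filter pvNE) := by
  induction L with
  | nil => simp
  | cons w L ih =>
    by_cases hw : w = []
    · subst hw
      rw [List.filter_cons_of_neg pvNE_nil]
      simp only [List.map_cons]
      rw [show pvG [] = [] from rfl, List.filter_cons_of_neg pvNE_nil]
      exact ih
    · rw [List.filter_cons_of_pos (by simp [pvNE, hw])]
      simp only [List.map_cons]
      by_cases hg : pvNE (pvG w) = true
      · rw [List.filter_cons_of_pos hg, List.filter_cons_of_pos hg, ih]
      · rw [List.filter_cons_of_neg hg, List.filter_cons_of_neg hg, ih]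

theorem pv_mem_splitOnP (p : Char → Bool) (xs : List Char) :
    ∀ w ∈ List.splitOnP p xs, ∀ c ∈ w, c ∈ xs ∧ p c = false := by
  induction xs with
  | nil => intro w hw c hc; simp [List.splitOnP_nil] at hw; subst hw; simp at hc
  | cons a rest ih =>
    obtain ⟨h, t, hs⟩ := List.exists_cons_of_ne_nil (List.splitOnP_ne_nil p rest)
    intro w hw c hc
    by_cases hp : p a
    · rw [List.splitOnP_cons, if_pos hp] at hw
      rcases List.mem_cons.mp hw with hw | hw
      · subst hw; simp at hc
      · obtain ⟨h1, h2⟩ := ih w hw c hc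
        exact ⟨.tail _ h1, h2⟩
    · rw [List.splitOnP_cons, if_neg hp, hs, List.modifyHead_cons] at hw
      rcases List.mem_cons.mp hw with hw | hw
      · subst hw
        rcases List.mem_cons.mp hc with hc | hc
        · subst hc; exact ⟨.head _, by simpa using hp⟩
        · obtain ⟨h1, h2⟩ := ih h (hs ▸ .head _) c hc
          exact ⟨.tail _ h1, h2⟩
      · obtain ⟨h1, h2⟩ := ih w (hs ▸ .tail _ hw) c hc
        exact ⟨.tail _ h1, h2⟩

theorem pv_mem_join (ws : List (List Char)) :
    ∀ c ∈ PySem.Chars.join [' '] ws, c = ' ' ∨ ∃ w ∈ ws, c ∈ w := by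
  induction ws with
  | nil => intro c hc; rw [pv_join_nil] at hc; simp at hc
  | cons w ws ih =>
    intro c hc
    cases ws with
    | nil => rw [pv_join_single] at hc; exact .inr ⟨w, .head _, hc⟩
    | cons w2 ws2 =>
      rw [pv_join_cons] at hc
      rcases List.mem_append.mp hc with hc | hc
      · exact .inr ⟨w, .head _, hc⟩
      · rcases List.mem_cons.mp hc with hc | hc
        · exact .inl hc
        · rcases ih c hc with hc' | ⟨w', hw', hcw⟩
          · exact .inl hc'
          · exact .inr ⟨w', .tail _ hw', hcw⟩

theorem pv_join_ne_nil (w : List Char) (ws : List (List Char)) (hw : w ≠ []) :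
    PySem.Chars.join [' '] (w :: ws) ≠ [] := by
  cases ws with
  | nil => rw [pv_join_single]; exact hw
  | cons w2 ws2 => rw [pv_join_cons]; simp

theorem pv_join_getLast (ws : List (List Char)) (h1 : ∀ w ∈ ws, w ≠ [])
    (h2 : ∀ w ∈ ws, ∀ c ∈ w, PySem.Chars.isspace c = false) :
    ∀ c, (PySem.Chars.join [' '] ws).getLast? = some c → PySem.Chars.isspace c = false := by
  induction ws with
  | nil => intro c hc; rw [pv_join_nil] at hc; simp at hc
  | cons w ws ih =>
    intro c hc
    cases ws with
    | nil =>
      rw [pv_join_single] at hc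
      exact h2 w (.head _) c (List.mem_of_getLast? hc)
    | cons w2 ws2 =>
      rw [pv_join_cons] at hc
      have hne : (' ' :: PySem.Chars.join [' '] (w2 :: ws2)) ≠ [] := by simp
      rw [List.getLast?_append_of_ne_nil _ hne] at hc
      have hj : PySem.Chars.join [' '] (w2 :: ws2) ≠ [] :=
        pv_join_ne_nil w2 ws2 (h1 w2 (.tail _ (.head _)))
      obtain ⟨d, m, hdm⟩ := List.exists_cons_of_ne_nil hj
      rw [hdm] at hc
      rw [show (' ' :: d :: m).getLast? = (d :: m).getLast? from by
        rw [List.getLast?_cons_cons]] at hc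
      rw [← hdm] at hc
      exact ih (fun w hw => h1 w (.tail _ hw)) (fun w hw => h2 w (.tail _ hw)) c hc

theorem pv_strip_id (ws : List (List Char)) (h1 : ∀ w ∈ ws, w ≠ [])
    (h2 : ∀ w ∈ ws, ∀ c ∈ w, PySem.Chars.isspace c = false) :
    PySem.Chars.strip (PySem.Chars.join [' '] ws) = PySem.Chars.join [' '] ws := by
  cases ws with
  | nil => rw [pv_join_nil]; rfl
  | cons w ws =>
    have hwne : w ≠ [] := h1 w (.head _)
    obtain ⟨a, w', ha⟩ := List.exists_cons_of_ne_nil hwne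
    have hlstrip : PySem.Chars.lstrip (PySem.Chars.join [' '] (w :: ws))
        = PySem.Chars.join [' '] (w :: ws) := by
      have hhead : ∃ r, PySem.Chars.join [' '] (w :: ws) = a :: r := by
        cases ws with
        | nil => exact ⟨w', by rw [pv_join_single, ha]⟩
        | cons w2 ws2 => exact ⟨w' ++ ' ' :: PySem.Chars.join [' '] (w2 :: ws2), by
            rw [pv_join_cons, ha]; rfl⟩
      obtain ⟨r, hr⟩ := hhead
      rw [hr, PySem.Chars.lstrip, List.dropWhile_cons,
        if_neg (by simp [h2 w (.head _) a (ha ▸ .head _)])]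
    rw [PySem.Chars.strip, hlstrip, PySem.Chars.rstrip]
    rcases hg : (PySem.Chars.join [' '] (w :: ws)).getLast? with _ | c
    · rw [List.getLast?_eq_none_iff] at hg
      exact absurd hg (pv_join_ne_nil w ws hwne)
    · have hcs : PySem.Chars.isspace c = false := pv_join_getLast _ h1 h2 c hg
      rw [← List.head?_reverse] at hg
      obtain ⟨m, hm⟩ : ∃ m, (PySem.Chars.join [' '] (w :: ws)).reverse = c :: m := by
        cases hrev : (PySem.Chars.join [' '] (w :: ws)).reverse with
        | nil => rw [hrev] at hg; simp at hg
        | cons d m => rw [hrev] at hg; simp at hg; exact ⟨m, by rw [hg]⟩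
      rw [hm, List.dropWhile_cons, if_neg (by simp [hcs]), ← hm, List.reverse_reverse]

theorem pv_INV (cs : List Char) (hd : ∀ c ∈ cs, pvDomChar c = true)
    (ws : List (List Char)) (cur : List Char) :
    pvGoWords cs ws cur
      = ws ++ (((List.splitOnP pvSb (cs.filter (fun c => !(c == '\r')))).map pvG).modifyHead
          (cur ++ ·)).filter pvNE := by
  induction cs generalizing ws cur with
  | nil =>
    simp only [pvGoWords, List.filter_nil, List.splitOnP_nil, List.map_cons, List.map_nil,
      List.modifyHead_cons]
    by_cases hc : cur.isEmpty
    · have : cur = [] := by simpa [List.isEmpty_iff] using hc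
      rw [if_pos hc, this]
      simp [List.filter_cons_of_neg pvNE_nil, pvG]
    · have hne : cur ≠ [] := by simpa [List.isEmpty_iff] using hc
      rw [if_neg hc]
      obtain ⟨a, cur', ha⟩ := List.exists_cons_of_ne_nil hne
      subst ha
      rw [show pvG [] = [] from rfl, List.append_nil,
        List.filter_cons_of_pos (pvNE_cons _ _)]
      simp
  | cons c rest ih =>
    have hdr : ∀ x ∈ rest, pvDomChar x = true := fun x hx => hd x (.tail _ hx)
    have ihx := ih hdr
    obtain ⟨h, t, hs⟩ := List.exists_cons_of_ne_nil
      (List.splitOnP_ne_nil pvSb (rest.filter (fun c => !(c == '\r'))))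
    rcases pv_classify c (hd c (.head _)) with ⟨c1, c2, c3⟩ | ⟨c1, c2, c3⟩ | ⟨c1, c2, c3, c4, c5⟩ | ⟨c1, c2, c3, c4, c5⟩
    · -- separator
      simp only [pvGoWords, c1, if_true, List.filter_cons, c3, Bool.not_false, if_true,
        List.splitOnP_cons, c2, List.map_cons]
      by_cases hc : cur.isEmpty
      · have hce : cur = [] := by simpa [List.isEmpty_iff] using hc
        rw [if_pos hc, ihx, hce]
        simp only [List.modifyHead_cons, show pvG [] = [] from rfl,
          List.filter_cons_of_neg pvNE_nil, List.nil_append, pv_modifyHead_id, pv_modifyHead_nil]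
      · have hne : cur ≠ [] := by simpa [List.isEmpty_iff] using hc
        rw [if_neg hc, ihx]
        simp only [List.modifyHead_cons, show pvG [] = [] from rfl, List.append_nil,
          List.filter_cons_of_pos (by simp [pvNE, hne] : pvNE cur = true),
          pv_modifyHead_id, pv_modifyHead_nil, List.append_assoc, List.singleton_append]
    · -- carriage return: dropped by B, filtered by the reference expression
      subst c3
      simp only [pvGoWords, c1, Bool.false_eq_true, if_false, c2, if_true, List.filter_cons]
      rw [show (!(('\r' : Char) == '\r')) = false from by simp]
      simp only [Bool.false_eq_true, if_false]
      exact ihx ws cur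
    · -- percent: dropped by B, removed inside words by pvG
      subst c3
      simp only [pvGoWords, c1, Bool.false_eq_true, if_false, c2, if_true, List.filter_cons, c5,
        Bool.not_false, if_true, List.splitOnP_cons, c4, Bool.false_eq_true, if_false,
        hs, List.modifyHead_cons, List.map_cons]
      rw [show pvG ('%' :: h) = pvG h from by simp [pvG, pvRb]]
      rw [ihx, hs]
      simp only [List.map_cons, List.modifyHead_cons, List.filter_cons]
    · -- kept character
      simp only [pvGoWords, c1, Bool.false_eq_true, if_false, c2, List.filter_cons, c5,
        Bool.not_false, if_true, List.splitOnP_cons, c3, Bool.false_eq_true, if_false,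
        hs, List.modifyHead_cons, List.map_cons]
      rw [show pvG (c :: h) = c :: pvG h from by simp [pvG, List.filter_cons, c4]]
      rw [ihx, hs]
      simp only [List.map_cons, List.modifyHead_cons, List.append_assoc, List.singleton_append]
      rw [List.filter_cons]


theorem pv_strip_nil_all (cs : List Char) (h : PySem.Chars.strip cs = []) :
    ∀ c ∈ cs, PySem.Chars.isspace c = true := by
  have hsplit := List.takeWhile_append_dropWhile (p := PySem.Chars.isspace) (l := cs)
  have hm : ∀ c ∈ cs.dropWhile PySem.Chars.isspace, PySem.Chars.isspace c = true := by
    have h2 : List.dropWhile PySem.Chars.isspace (cs.dropWhile PySem.Chars.isspace).reverse = [] := by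
      have := h
      rw [PySem.Chars.strip, PySem.Chars.lstrip, PySem.Chars.rstrip] at this
      simpa using this
    intro c hc
    exact (List.dropWhile_eq_nil_iff).mp h2 c (by simpa using hc)
  intro c hc
  rw [← hsplit] at hc
  rcases List.mem_append.mp hc with hc | hc
  · exact List.mem_takeWhile_imp hc
  · exact hm c hc

theorem pv_all_sb (m : List Char) (h : ∀ c ∈ m, pvSb c = true) :
    ((List.splitOnP pvSb m).map pvG).filter pvNE = [] := by
  induction m with
  | nil => simp [List.splitOnP_nil, List.filter_cons_of_neg pvNE_nil, pvG]
  | cons c m ih =>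
    rw [List.splitOnP_cons, if_pos (h c (.head _)), List.map_cons,
      show pvG [] = [] from rfl, List.filter_cons_of_neg pvNE_nil]
    exact ih (fun c hc => h c (.tail _ hc))

theorem pv_all_space (cs : List Char) (hd : ∀ c ∈ cs, pvDomChar c = true)
    (h : PySem.Chars.strip cs = []) : pvWords cs = [] := by
  apply pv_all_sb
  intro c hc
  have hcm : c ∈ cs := List.mem_of_mem_filter hc
  exact pv_sp_imp_sb c (pv_strip_nil_all cs h c hcm)

theorem pv_filter_keep1 (cs : List Char) (hd : ∀ c ∈ cs, pvDomChar c = true) :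
    cs.filter (fun c => decide (32 ≤ c.toNat) || c == '\n' || c == '\t')
      = cs.filter (fun c => !(c == '\r')) := by
  apply List.filter_congr
  intro c hc
  exact pv_keep1 c (hd c hc)

theorem pv_A_main (cs : List Char) (hd : ∀ c ∈ cs, pvDomChar c = true) :
    PySem.Chars.strip (PySem.Chars.join [' '] (PySem.Chars.split₀
      (PySem.Chars.replace (PySem.Chars.replace (PySem.Chars.replace
        (PySem.Chars.replace (PySem.Chars.join [' '] (PySem.Chars.split₀
          (cs.filter (fun c => decide (32 ≤ c.toNat) || c == '\n' || c == '\t')))) ['@'] [' '])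
        ['#'] [' ']) ['$'] [' ']) ['%'] [])))
      = PySem.Chars.join [' '] (pvWords cs) := by
  rw [pv_filter_keep1 cs hd, pv_split₀_eq, pv_replaces_eq, pv_split₀_eq]
  set L := List.splitOnP PySem.Chars.isspace (cs.filter (fun c => !(c == '\r'))) with hL
  have hOk : ∀ c ∈ PySem.Chars.join [' '] (L.filter pvNE),
      PySem.Chars.isspace c = true → c = ' ' := by
    intro c hc hsp
    rcases pv_mem_join _ c hc with hc' | ⟨w, hw, hcw⟩
    · exact hc'
    · have := (pv_mem_splitOnP PySem.Chars.isspace _ w (List.mem_of_mem_filter hw) c hcw).2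
      rw [hsp] at this; cases this
  rw [pv_sub_split _ hOk]
  have hwords : ((List.splitOnP pvSb (PySem.Chars.join [' '] (L.filter pvNE))).map pvG).filter pvNE
      = pvWords cs := by
    rw [pv_E, pv_split_join, pv_unfilter, pv_nested_split, ← pv_E]
    rfl
  rw [hwords]
  apply pv_strip_id
  · intro w hw
    have := List.of_mem_filter hw
    simpa [pvNE, List.isEmpty_iff] using this
  · intro w hw c hc
    obtain ⟨w', hw', hww⟩ := List.mem_map.mp (List.mem_of_mem_filter hw)
    have hcw' : c ∈ w' := by
      rw [← hww] at hc
      exact List.mem_of_mem_filter hc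
    have hsb := (pv_mem_splitOnP pvSb _ w' hw' c hcw').2
    cases hx : PySem.Chars.isspace c
    · rfl
    · rw [pv_sp_imp_sb c hx] at hsb; cases hsb

theorem pv_B_main (cs : List Char) (hd : ∀ c ∈ cs, pvDomChar c = true) :
    pvGoWords cs [] [] = pvWords cs := by
  rw [pv_INV cs hd [] [], pv_modifyHead_nil]
  rfl

-- ===== VERDICT (by name: the statement is the Claim_ definition above) =====
theorem sanitize_device_name_spec : Claim_equal_sanitize_device_name := by
  intro name hDom
  unfold Spec_sanitize_device_name
  cases name with
  | none => rfl
  | some s =>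
    have hd : ∀ c ∈ s.toList, pvDomChar c = true := by
      have : pvDomStr s = true := by simpa [Dom_sanitize_device_name] using hDom
      simpa [pvDomStr, List.all_eq_true] using this
    simp only [sanitize_device_name, sanitize_device_name_alt]
    rw [pv_B_main s.toList hd]
    by_cases hstrip : (PySem.Chars.strip s.toList).isEmpty
    · rw [if_pos hstrip]
      have hnil : pvWords s.toList = [] :=
        pv_all_space s.toList hd (by simpa [List.isEmpty_iff] using hstrip)
      rw [hnil, pv_join_nil]
    · rw [if_neg hstrip]
      rw [pv_A_main s.toList hd]
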